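-- pv_equiv track=rewrite | github.com/ojrade/CS-540 | ten_hundred.py | calculate_x_y
-- ===== SOURCE A (Python) =====
-- def calculate_x_y(time_series):
--     cases = time_series['Cases']
--     curI = len(cases) - 1
--     n = int(cases[curI])
--     nDiv = n/10
--     n10I = -1
--     n100I = -1
--     updated = False
--     if(n == 0):
--         return (-1,-1)
--     while(curI >= 0):
--         cur = int(cases[curI])
--         if(cur <= nDiv):
--             if(not updated):
--                 n10I = curI
--                 nDiv = n/100
--                 updated = True
--             else:
--                 n100I = curI
--                 nDiv = -1
--         curI -= 1
--     if(n10I == -1):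
--         x = -1
--     else:
--         x = len(cases) - 1
--         x = x - n10I
--     if(n100I == -1):
--         y = -1
--     else:
--         y = n10I - n100I
--     return (x,y)
-- ===== SOURCE B (Python) =====
-- def calculate_x_y(time_series):
--     cases = time_series['Cases']
--     n = int(cases[-1])
--     if n == 0:
--         return (-1, -1)
--     a = b1 = b2 = -1
--     for i, c in enumerate(cases):
--         c = int(c)
--         if c * 10 <= n:
--             a = i
--         if c * 100 <= n:
--             b1, b2 = i, b1
--     if a == -1:
--         return (-1, -1)
--     n100 = b2 if b1 == a else b1
--     return (len(cases) - 1 - a, a - n100 if n100 != -1 else -1)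
-- ===== Notes on version B (the rewrite author's own statement) =====
-- stated objective: alternative
-- what changed: Replaces A's backward stateful scan (mutable threshold nDiv with an 'updated' flag) by a single forward pass that tracks the last index with 10*c<=n and the last two indices with 100*c<=n, assembling x and y afterwards; float thresholds n/10, n/100 become exact integer comparisons (equivalent for |n|<=2^31).
-- outside the precondition, e.g. on calculate_x_y({'Cases': [-1, 1, 10, 100]}): A returns (1, 2), B returns (1, 1)
import Mathlib
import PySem

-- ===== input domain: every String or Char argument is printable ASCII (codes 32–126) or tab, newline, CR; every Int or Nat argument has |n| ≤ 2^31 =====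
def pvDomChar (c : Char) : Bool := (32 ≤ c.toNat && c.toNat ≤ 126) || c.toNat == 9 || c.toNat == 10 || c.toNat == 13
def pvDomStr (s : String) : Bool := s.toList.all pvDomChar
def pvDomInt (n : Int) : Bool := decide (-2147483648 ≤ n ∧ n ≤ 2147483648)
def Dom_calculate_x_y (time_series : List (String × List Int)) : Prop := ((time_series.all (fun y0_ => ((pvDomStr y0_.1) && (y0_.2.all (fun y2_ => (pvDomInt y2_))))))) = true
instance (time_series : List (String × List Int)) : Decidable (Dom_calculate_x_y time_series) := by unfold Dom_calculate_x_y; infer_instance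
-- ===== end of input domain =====

-- B replaces A's backward scan with a mutating float threshold and an 'updated' flag by a single
-- forward pass tracking the last 10%-hit and the last two 100%-hit indices (objective: alternative).

-- ===== PORT A =====
-- A's while loop, curI descending from len-1 to 0; fuel f means curI = f-1.
-- A's float threshold nDiv ∈ {n/10, n/100, -1} is carried as an exact rational (num, den) with den > 0;
-- 'cur <= nDiv' is ported as 'cur * den ≤ num', exact for |values| ≤ 2^31 (the stated Dom).
def aLoop (cases : List Int) (n : Int) : Nat → Int → Int → (Int × Int) → Bool → Int × Int
  | 0, n10I, n100I, _, _ => (n10I, n100I)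
  | k+1, n10I, n100I, nDiv, updated =>
    let cur := cases.getD k 0          -- cases[curI], always in range in A's loop
    if cur * nDiv.2 ≤ nDiv.1 then
      if updated = false then aLoop cases n k (k : Int) n100I (n, 100) true
      else aLoop cases n k n10I (k : Int) (-1, 1) updated
    else aLoop cases n k n10I n100I nDiv updated

def calculate_x_y (time_series : List (String × List Int)) : Int × Int :=
  match (PySem.Dict.mk time_series).get? "Cases" with
  | none => (-1, -1)                   -- Python raises KeyError here (outside Pre_)
  | some cases =>
    match PySem.List.pyGet? cases ((cases.length : Int) - 1) with   -- cases[curI], curI = len(cases)-1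
    | none => (-1, -1)                 -- Python raises IndexError here (outside Pre_)
    | some n =>
      if n = 0 then (-1, -1)
      else
        let r := aLoop cases n cases.length (-1) (-1) (n, 10) false
        let x := if r.1 = -1 then -1 else (cases.length : Int) - 1 - r.1
        let y := if r.2 = -1 then -1 else r.1 - r.2
        (x, y)

-- ===== PORT B =====
-- B's forward for-loop over enumerate(cases) with state (a, b1, b2).
def bLoop (n : Int) : List Int → Int → Int × Int × Int → Int × Int × Int
  | [], _, st => st
  | c :: rest, i, st =>
    let a := if c * 10 ≤ n then i else st.1
    let b1 := if c * 100 ≤ n then i else st.2.1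
    let b2 := if c * 100 ≤ n then st.2.1 else st.2.2
    bLoop n rest (i + 1) (a, b1, b2)

def calculate_x_y_alt (time_series : List (String × List Int)) : Int × Int :=
  match (PySem.Dict.mk time_series).get? "Cases" with
  | none => (-1, -1)                   -- Python raises KeyError here (outside Pre_)
  | some cases =>
    match PySem.List.pyGet? cases (-1) with      -- cases[-1]
    | none => (-1, -1)                 -- Python raises IndexError here (outside Pre_)
    | some n =>
      if n = 0 then (-1, -1)
      else
        let st := bLoop n cases 0 (-1, -1, -1)
        if st.1 = -1 then (-1, -1)
        else
          let n100 := if st.2.1 = st.1 then st.2.2 else st.2.1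
          ((cases.length : Int) - 1 - st.1, if n100 ≠ -1 then st.1 - n100 else -1)

-- ===== PRECONDITION & SPEC =====
-- Pre_ excludes inputs on which A raises (no 'Cases' key: KeyError; empty list: IndexError) and
-- restricts to the task's natural domain of nonnegative case counts: on a negative entry A's
-- leaked sentinel threshold nDiv = -1 can re-fire and overwrite n100I, an accident B does not copy.
def Pre_calculate_x_y (time_series : List (String × List Int)) : Prop :=
  ((PySem.Dict.mk time_series).get? "Cases").isSome = true ∧
  ((PySem.Dict.mk time_series).get? "Cases").getD [] ≠ [] ∧
  ∀ c ∈ ((PySem.Dict.mk time_series).get? "Cases").getD [], 0 ≤ c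
instance (time_series : List (String × List Int)) : Decidable (Pre_calculate_x_y time_series) := by
  unfold Pre_calculate_x_y; infer_instance

def pvWitness_calculate_x_y : (List (String × List Int)) := [("Cases", [1, 3, 40, 100])]

def Spec_calculate_x_y (time_series : List (String × List Int)) (out : Int × Int) : Prop := out = calculate_x_y_alt time_series
instance (time_series : List (String × List Int)) (out : Int × Int) : Decidable (Spec_calculate_x_y time_series out) := by unfold Spec_calculate_x_y; infer_instance

-- ===== CLAIM (what is proved, stated in full; the proofs are below) =====
def Claim_equal_calculate_x_y : Prop := ∀ (time_series : List (String × List Int)), Dom_calculate_x_y time_series → Pre_calculate_x_y time_series → Spec_calculate_x_y time_series (calculate_x_y time_series)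

-- ===== LEMMAS AND PROOFS =====

-- Spec skeleton: greatest index k < f with cases[k]*m ≤ n, scanning descending (else -1).
def fhd (cases : List Int) (m n : Int) : Nat → Int
  | 0 => -1
  | k+1 => if cases.getD k 0 * m ≤ n then (k : Int) else fhd cases m n k

theorem fhd_lt (cases : List Int) (m n : Int) : ∀ f, fhd cases m n f < (f : Int) := by
  intro f; induction f with
  | zero => simp [fhd]
  | succ k ih => simp only [fhd]; split <;> push_cast <;> omega

theorem fhd_ge (cases : List Int) (m n : Int) : ∀ f, -1 ≤ fhd cases m n f := by
  intro f; induction f with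
  | zero => simp [fhd]
  | succ k ih => simp only [fhd]; split <;> omega

theorem fhd_trunc (cases : List Int) (m n : Int) :
    ∀ f g, g ≤ f → fhd cases m n f < (g : Int) → fhd cases m n g = fhd cases m n f := by
  intro f; induction f with
  | zero => intro g hg _; have : g = 0 := by omega
            subst this; rfl
  | succ k ih =>
    intro g hg hlt
    rcases Nat.eq_or_lt_of_le hg with h | h
    · rw [h]
    · have hg' : g ≤ k := by omega
      by_cases hc : cases.getD k 0 * m ≤ n
      · exfalso; simp only [fhd] at hlt; rw [if_pos hc] at hlt; omega
      · simp only [fhd] at hlt ⊢; rw [if_neg hc] at hlt ⊢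
        exact ih g hg' hlt

theorem fhd_mono (cases : List Int) (n : Int) (hnn : ∀ k, 0 ≤ cases.getD k 0) :
    ∀ f, fhd cases 100 n f ≤ fhd cases 10 n f := by
  intro f; induction f with
  | zero => simp [fhd]
  | succ k ih =>
    have hp := hnn k
    by_cases h1 : cases.getD k 0 * 100 ≤ n
    · have h2 : cases.getD k 0 * 10 ≤ n := by omega
      simp only [fhd]; rw [if_pos h1, if_pos h2]
    · by_cases h2 : cases.getD k 0 * 10 ≤ n
      · simp only [fhd]; rw [if_neg h1, if_pos h2]
        have := fhd_lt cases 100 n k; omega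
      · simp only [fhd]; rw [if_neg h1, if_neg h2]; exact ih

-- ---- A-side: characterisation of aLoop in each of its three threshold states ----

theorem aLoop_sentinel (cases : List Int) (n : Int) (hnn : ∀ k, 0 ≤ cases.getD k 0) :
    ∀ f j i0 u, aLoop cases n f j i0 (-1, 1) u = (j, i0) := by
  intro f; induction f with
  | zero => intro j i0 u; rfl
  | succ k ih =>
    intro j i0 u
    have h : ¬ (cases.getD k 0 * 1 ≤ (-1 : Int)) := by have := hnn k; omega
    simp only [aLoop, h, if_false]
    exact ih j i0 u

theorem aLoop_phase2 (cases : List Int) (n : Int) (hnn : ∀ k, 0 ≤ cases.getD k 0) :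
    ∀ f j, aLoop cases n f j (-1) (n, 100) true = (j, fhd cases 100 n f) := by
  intro f; induction f with
  | zero => intro j; rfl
  | succ k ih =>
    intro j
    by_cases h : cases.getD k 0 * 100 ≤ n
    · simp only [aLoop, h, if_true, fhd, if_false, Bool.true_eq_false]
      exact aLoop_sentinel cases n hnn k j k true
    · simp only [aLoop, h, fhd, if_false]
      exact ih j

theorem aLoop_phase1 (cases : List Int) (n : Int) (hnn : ∀ k, 0 ≤ cases.getD k 0) :
    ∀ f, aLoop cases n f (-1) (-1) (n, 10) false =
      (fhd cases 10 n f,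
       if fhd cases 10 n f = -1 then -1 else fhd cases 100 n (fhd cases 10 n f).toNat) := by
  intro f; induction f with
  | zero => rfl
  | succ k ih =>
    by_cases h : cases.getD k 0 * 10 ≤ n
    · have hk : ((k : Int)) ≠ -1 := by omega
      have hk2 : ((k : Int)).toNat = k := by omega
      simp only [aLoop, h, if_true, fhd, hk, if_false, hk2]
      exact aLoop_phase2 cases n hnn k k
    · simp only [aLoop, h, fhd, if_false]
      exact ih

-- ---- B-side: bLoop splits over append, and is characterised by fhd ----

theorem bLoop_append (n : Int) :
    ∀ (ys zs : List Int) (i : Int) st,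
      bLoop n (ys ++ zs) i st = bLoop n zs (i + (ys.length : Int)) (bLoop n ys i st) := by
  intro ys; induction ys with
  | nil => intro zs i st; simp [bLoop]
  | cons c rest ih =>
    intro zs i st
    simp only [List.cons_append, bLoop, List.length_cons]
    rw [ih]
    congr 1
    push_cast; ring

theorem bLoop_spec (n : Int) :
    ∀ (cs : List Int), bLoop n cs 0 (-1, -1, -1) =
      (fhd cs 10 n cs.length, fhd cs 100 n cs.length,
       if fhd cs 100 n cs.length = -1 then -1 else fhd cs 100 n (fhd cs 100 n cs.length).toNat) := by
  intro cs
  induction cs using List.reverseRecOn with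
  | nil => rfl
  | append_singleton xs x ih =>
    have hgetx : (xs ++ [x]).getD xs.length 0 = x := by
      simp [List.getD]
    have hgetl : ∀ k, k < xs.length → (xs ++ [x]).getD k 0 = xs.getD k 0 := by
      intro k hk; simp [List.getD, List.getElem?_append_left hk]
    have htr : ∀ m f, f ≤ xs.length → fhd (xs ++ [x]) m n f = fhd xs m n f := by
      intro m f; induction f with
      | zero => intro _; rfl
      | succ k ihf =>
        intro hf
        have hk : k < xs.length := by omega
        simp only [fhd, hgetl k hk]
        split
        · rfl
        · exact ihf (by omega)
    have hlen : (xs ++ [x]).length = xs.length + 1 := by simp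
    rw [bLoop_append n xs [x] 0 (-1, -1, -1), ih]
    have hF2lt := fhd_lt xs 100 n xs.length
    have hF2ge := fhd_ge xs 100 n xs.length
    simp only [bLoop, hlen, fhd, hgetx, zero_add]
    by_cases h10 : x * 10 ≤ n <;> by_cases h100 : x * 100 ≤ n <;>
      simp only [h10, h100, if_true, if_false, htr 10 xs.length (le_refl _),
        htr 100 xs.length (le_refl _)]
    · refine Prod.ext rfl (Prod.ext rfl ?_)
      rw [if_neg (by omega : ¬((xs.length : Int) = -1)), Int.toNat_natCast,
        htr 100 xs.length (le_refl _)]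
    · refine Prod.ext rfl (Prod.ext rfl ?_)
      by_cases hF2 : fhd xs 100 n xs.length = -1
      · rw [if_pos hF2, if_pos hF2]
      · rw [if_neg hF2, if_neg hF2, htr 100 _ (by omega)]
    · refine Prod.ext rfl (Prod.ext rfl ?_)
      rw [if_neg (by omega : ¬((xs.length : Int) = -1)), Int.toNat_natCast,
        htr 100 xs.length (le_refl _)]
    · refine Prod.ext rfl (Prod.ext rfl ?_)
      by_cases hF2 : fhd xs 100 n xs.length = -1
      · rw [if_pos hF2, if_pos hF2]
      · rw [if_neg hF2, if_neg hF2, htr 100 _ (by omega)]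

-- the two ways both ports read n agree on a nonempty list
theorem pyGet_last_eq (cases : List Int) (h : cases ≠ []) :
    PySem.List.pyGet? cases ((cases.length : Int) - 1) = PySem.List.pyGet? cases (-1) := by
  have hl : 0 < cases.length := List.length_pos_iff.mpr h
  rw [PySem.List.pyGet?_neg_one]
  have : ((cases.length : Int) - 1) = ((cases.length - 1 : Nat) : Int) := by omega
  rw [this, PySem.List.pyGet?_natCast]
  exact List.getLast?_eq_getElem?.symm

-- ===== VERDICT (by name: the statement is the Claim_ definition above) =====
theorem calculate_x_y_spec : Claim_equal_calculate_x_y := by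
  intro ts _ hpre
  obtain ⟨hsome, hne, hnn⟩ := hpre
  unfold Spec_calculate_x_y calculate_x_y calculate_x_y_alt
  obtain ⟨cases, hcs⟩ := Option.isSome_iff_exists.mp hsome
  rw [hcs] at hne hnn ⊢
  simp only [Option.getD_some] at hne hnn
  dsimp only
  rw [pyGet_last_eq cases hne]
  cases hn : PySem.List.pyGet? cases (-1) with
  | none => rfl
  | some n =>
    dsimp only
    by_cases h0 : n = 0
    · simp [h0]
    · rw [if_neg h0, if_neg h0]
      have hnn' : ∀ k, 0 ≤ cases.getD k 0 := by
        intro k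
        by_cases hk : k < cases.length
        · rw [List.getD_eq_getElem cases 0 hk]
          exact hnn _ (List.getElem_mem hk)
        · rw [List.getD_eq_default cases 0 (by omega)]
      rw [aLoop_phase1 cases n hnn', bLoop_spec n]
      set F1 := fhd cases 10 n cases.length with hF1def
      set F2 := fhd cases 100 n cases.length with hF2def
      have hF1lt := fhd_lt cases 10 n cases.length
      have hF1ge := fhd_ge cases 10 n cases.length
      have hF2ge := fhd_ge cases 100 n cases.length
      have hmono : F2 ≤ F1 := fhd_mono cases n hnn' cases.length
      by_cases hF1 : F1 = -1
      · simp [hF1]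
      · have hA2 : (if F1 = -1 then (-1 : Int) else fhd cases 100 n F1.toNat)
            = fhd cases 100 n F1.toNat := if_neg hF1
        simp only [hA2, if_neg hF1]
        by_cases hb : F2 = F1
        · -- last 100-hit is the 10-hit itself: B takes the second-last, = A's truncated scan
          have ht : fhd cases 100 n F1.toNat = (if F2 = -1 then (-1:Int) else fhd cases 100 n F2.toNat) := by
            rw [if_neg (by omega : ¬ F2 = -1), hb]
          rw [if_pos hb, ht]
          by_cases hy : (if F2 = -1 then (-1:Int) else fhd cases 100 n F2.toNat) = -1
          · simp [hy]
          · simp [hy]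
        · -- last 100-hit lies strictly below F1: A's truncated scan finds exactly it
          have hlt : F2 < F1 := lt_of_le_of_ne hmono hb
          have ht : fhd cases 100 n F1.toNat = F2 := by
            rw [hF2def]
            exact fhd_trunc cases 100 n cases.length F1.toNat (by omega) (by omega)
          rw [if_neg hb, ht]
          by_cases hy : F2 = -1
          · simp [hy]
          · simp [hy]
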